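-- pv_equiv track=rewrite | github.com/edt-yxz-zzd/python3_src | seed/recognize/cmdline/adhoc_argparser.py | _parse_pseudo_func_name
-- ===== SOURCE A (Python) =====
-- def _parse_pseudo_func_name(pseudo_func_name, /):
--     'pseudo_func_name -> (payload4prefix, func_name)'
--     for ch in pseudo_func_name[::-1]:
--         #bug:@末尾字符是数字:if not (ch=='_' or ch.isidentifier()):
--         if not (ch=='_' or ch.isalnum()):
--             i = 1+pseudo_func_name.rindex(ch)
--             break
--     else:
--         i = 0
--     func_name = pseudo_func_name[i:]
--     payload4prefix = pseudo_func_name[:i]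
--     return (payload4prefix, func_name)
-- ===== SOURCE B (Python) =====
-- def _parse_pseudo_func_name(pseudo_func_name, /):
--     'pseudo_func_name -> (payload4prefix, func_name)'
--     i = 0
--     for idx, ch in enumerate(pseudo_func_name):
--         if not (ch == '_' or ch.isalnum()):
--             i = idx + 1
--     return (pseudo_func_name[:i], pseudo_func_name[i:])
-- ===== Notes on version B (the rewrite author's own statement) =====
-- stated objective: simpler
-- what changed: Replaced the backward scan with break plus a redundant rindex re-scan by one forward pass over enumerate that keeps the index just past the last separator character.
import Mathlib
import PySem

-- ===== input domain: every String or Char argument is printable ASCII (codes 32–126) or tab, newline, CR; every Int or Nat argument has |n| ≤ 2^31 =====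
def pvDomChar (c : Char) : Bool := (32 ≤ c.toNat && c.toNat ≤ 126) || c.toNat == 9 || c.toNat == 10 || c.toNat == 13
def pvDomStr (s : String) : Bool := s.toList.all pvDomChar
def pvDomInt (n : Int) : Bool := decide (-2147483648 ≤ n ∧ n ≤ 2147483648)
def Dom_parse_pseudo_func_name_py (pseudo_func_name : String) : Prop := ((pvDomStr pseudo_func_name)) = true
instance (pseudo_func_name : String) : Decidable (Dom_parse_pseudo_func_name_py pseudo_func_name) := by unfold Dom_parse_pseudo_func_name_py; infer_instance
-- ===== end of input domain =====

-- B replaces A's backward scan + rindex re-scan by a single forward pass keeping the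
-- index just past the last separator; objective: simpler (one pass, no re-scan).

-- ===== PORT A =====
-- the 'for ch in pseudo_func_name[::-1]: … break / else: i = 0' loop; the broken-out
-- branch computes 1 + s.rindex(ch). Since ch was just seen in s, rindex never raises
-- and equals rfind, so PySem.Chars.rfind is exact here.
def pvAGo (cs : List Char) : List Char → Int
  | [] => 0
  | ch :: rest =>
      if !(ch == '_' || PySem.Chars.isalnum ch) then
        1 + PySem.Chars.rfind cs [ch]
      else pvAGo cs rest

def parse_pseudo_func_name_py (pseudo_func_name : String) : String × String :=
  let i : Int := pvAGo pseudo_func_name.toList pseudo_func_name.toList.reverse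
  let func_name := PySem.Str.slice pseudo_func_name (some i) none
  let payload4prefix := PySem.Str.slice pseudo_func_name none (some i)
  (payload4prefix, func_name)

-- ===== PORT B =====
-- forward pass: i := idx + 1 at every separator, so i ends just past the last one.
def parse_pseudo_func_name_py_alt (pseudo_func_name : String) : String × String :=
  let i : Int := (PySem.List.enumerate pseudo_func_name.toList 0).foldl
      (fun i p => if !(p.2 == '_' || PySem.Chars.isalnum p.2) then p.1 + 1 else i) 0
  (PySem.Str.slice pseudo_func_name none (some i), PySem.Str.slice pseudo_func_name (some i) none)

-- ===== PRECONDITION & SPEC =====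
def Spec_parse_pseudo_func_name_py (pseudo_func_name : String) (out : String × String) : Prop := out = parse_pseudo_func_name_py_alt pseudo_func_name
instance (pseudo_func_name : String) (out : String × String) : Decidable (Spec_parse_pseudo_func_name_py pseudo_func_name out) := by unfold Spec_parse_pseudo_func_name_py; infer_instance

-- ===== CLAIM (what is proved, stated in full; the proofs are below) =====
def Claim_equal_parse_pseudo_func_name_py : Prop := ∀ (pseudo_func_name : String), Dom_parse_pseudo_func_name_py pseudo_func_name → Spec_parse_pseudo_func_name_py pseudo_func_name (parse_pseudo_func_name_py pseudo_func_name)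

-- ===== LEMMAS AND PROOFS =====

-- rfind on a snoc: stepping past a non-matching last character
theorem pv_rfind_go_snoc_ne (ds : List Char) (c ch : Char) (h : ch ≠ c) :
    ∀ k : Nat, k ≤ ds.length →
      PySem.Chars.rfind.go (ds ++ [c]) [ch] k = PySem.Chars.rfind.go ds [ch] k := by
  intro k
  induction k with
  | zero =>
      intro _
      simp only [PySem.Chars.rfind.go]
      have : [ch].isPrefixOf (ds ++ [c]) = [ch].isPrefixOf ds := by
        cases ds with
        | nil => simp [List.isPrefixOf, h]
        | cons d ds' => simp [List.isPrefixOf]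
      rw [this]
  | succ j ih =>
      intro hk
      simp only [PySem.Chars.rfind.go]
      have hdrop : [ch].isPrefixOf (List.drop (j+1) (ds ++ [c])) = [ch].isPrefixOf (List.drop (j+1) ds) := by
        rcases Nat.lt_or_ge (j+1) ds.length with hlt | hge
        · rw [List.drop_append_of_le_length (by omega)]
          cases hd : List.drop (j+1) ds with
          | nil => exact absurd (List.drop_eq_nil_iff.mp hd) (by omega)
          | cons d rest => simp [List.isPrefixOf]
        · have hj : j + 1 = ds.length := by omega
          rw [hj]
          simp [List.isPrefixOf, h]
      rw [hdrop]
      by_cases hp : [ch].isPrefixOf (List.drop (j+1) ds) = true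
      · simp [hp]
      · simp only [Bool.not_eq_true] at hp
        simp [hp, ih (by omega)]

theorem pv_rfind_snoc_ne (ds : List Char) (c ch : Char) (h : ch ≠ c) :
    PySem.Chars.rfind (ds ++ [c]) [ch] = PySem.Chars.rfind ds [ch] := by
  unfold PySem.Chars.rfind
  have hlen : (ds ++ [c]).length = ds.length + 1 := by simp
  rw [hlen]
  simp only [PySem.Chars.rfind.go]
  have : [ch].isPrefixOf (List.drop (ds.length + 1) (ds ++ [c])) = false := by
    rw [List.drop_eq_nil_of_le (by simp)]
    simp [List.isPrefixOf]
  simp only [this, Bool.false_eq_true, if_false]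
  exact pv_rfind_go_snoc_ne ds c ch h ds.length le_rfl

theorem pv_rfind_snoc_self (ds : List Char) (c : Char) :
    PySem.Chars.rfind (ds ++ [c]) [c] = (ds.length : Int) := by
  unfold PySem.Chars.rfind
  have hlen : (ds ++ [c]).length = ds.length + 1 := by simp
  rw [hlen]
  simp only [PySem.Chars.rfind.go]
  have h1 : [c].isPrefixOf (List.drop (ds.length + 1) (ds ++ [c])) = false := by
    rw [List.drop_eq_nil_of_le (by simp)]
    simp [List.isPrefixOf]
  simp only [h1, Bool.false_eq_true, if_false]
  cases ds with
  | nil =>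
      simp only [List.nil_append, List.length_nil, PySem.Chars.rfind.go]
      simp [List.isPrefixOf]
  | cons d ds' =>
      have h2 : [c].isPrefixOf (List.drop ((d :: ds').length - 1 + 1) ((d :: ds') ++ [c])) = true := by
        have : (d :: ds').length - 1 + 1 = (d :: ds').length := by simp
        rw [this, List.drop_append_of_le_length le_rfl]
        simp [List.isPrefixOf]
      have h3 : (d :: ds').length = (d :: ds').length - 1 + 1 := by simp
      rw [h3]
      simp only [PySem.Chars.rfind.go, h2, if_true]

-- the snoc char is a non-separator ⇒ A's rfind calls may forget it
theorem pv_aGo_snoc (ds : List Char) (c : Char) (hc : (c == '_' || PySem.Chars.isalnum c) = true) :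
    ∀ rev : List Char, pvAGo (ds ++ [c]) rev = pvAGo ds rev := by
  intro rev
  induction rev with
  | nil => rfl
  | cons ch rest ih =>
      simp only [pvAGo]
      by_cases hch : (ch == '_' || PySem.Chars.isalnum ch) = true
      · simp [hch, ih]
      · have hne : ch ≠ c := by
          intro he; rw [he] at hch; exact hch hc
        simp only [Bool.not_eq_true] at hch
        simp [hch, pv_rfind_snoc_ne ds c ch hne]

-- B's fold as a separate name, for the induction
def pvBFold (cs : List Char) : Int :=
  (PySem.List.enumerate cs 0).foldl
    (fun i p => if !(p.2 == '_' || PySem.Chars.isalnum p.2) then p.1 + 1 else i) 0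

theorem pv_bFold_snoc (ds : List Char) (c : Char) :
    pvBFold (ds ++ [c]) =
      if !(c == '_' || PySem.Chars.isalnum c) then (ds.length : Int) + 1 else pvBFold ds := by
  unfold pvBFold
  rw [PySem.List.enumerate_append, List.foldl_append]
  simp [PySem.List.enumerate]

theorem pv_main (cs : List Char) : pvAGo cs cs.reverse = pvBFold cs := by
  induction cs using List.reverseRecOn with
  | nil => rfl
  | append_singleton ds c ih =>
      rw [List.reverse_append, pv_bFold_snoc]
      simp only [List.reverse_singleton, List.singleton_append, pvAGo]
      by_cases hc : (c == '_' || PySem.Chars.isalnum c) = true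
      · simp [hc, pv_aGo_snoc ds c hc, ih]
      · simp only [Bool.not_eq_true] at hc
        simp [hc, pv_rfind_snoc_self]
        omega

-- ===== VERDICT (by name: the statement is the Claim_ definition above) =====
theorem parse_pseudo_func_name_py_spec : Claim_equal_parse_pseudo_func_name_py := by
  intro s _
  unfold Spec_parse_pseudo_func_name_py parse_pseudo_func_name_py parse_pseudo_func_name_py_alt
  rw [pv_main s.toList]
  rfl
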